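-- pv_equiv track=rewrite | github.com/Royeqiu/Sentence_generator | sentence_generator.py | set_unigram_count_table
-- ===== SOURCE A (Python) =====
-- def set_unigram_count_table(stories):
--     count_table=dict()
--     total_count=0
--     for story in stories:
--         for i,word in enumerate(story):
--             if i==len(story)-1:
--                 break
--             if word in count_table.keys():
--                 if story[i+1] in count_table[word].keys():
--                     count_table[word][story[i+1]]=count_table[word][story[i+1]]+1
--                 elif story[i+1] not in count_table[word].keys():
--                     count_table[word][story[i+1]]=1
--             elif word not in count_table.keys():
--                 word_count_table=dict()
--                 word_count_table[story[i+1]]=1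
--                 count_table[word]=word_count_table
--             total_count+=1
--     return total_count,count_table
-- ===== SOURCE B (Python) =====
-- def set_unigram_count_table(stories):
--     # pass 1: flatten all consecutive word pairs and count them in one flat dict
--     pairs = [p for story in stories for p in zip(story, story[1:])]
--     flat = {}
--     for p in pairs:
--         flat[p] = flat.get(p, 0) + 1
--     # pass 2: reshape the flat {(w1,w2): c} table into the nested {w1: {w2: c}} dict
--     table = {}
--     for (w1, w2), c in flat.items():
--         table.setdefault(w1, {})[w2] = c
--     return len(pairs), table
-- ===== Notes on version B (the rewrite author's own statement) =====
-- stated objective: alternative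
-- what changed: Instead of incrementally maintaining the nested dict inside a double loop with membership branches, B flattens all consecutive word pairs into one list, counts them in a single flat {(w1,w2): c} dict, and then reshapes that flat table into the nested {w1: {w2: c}} dict in a second pass; total_count becomes len(pairs).
import Mathlib
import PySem

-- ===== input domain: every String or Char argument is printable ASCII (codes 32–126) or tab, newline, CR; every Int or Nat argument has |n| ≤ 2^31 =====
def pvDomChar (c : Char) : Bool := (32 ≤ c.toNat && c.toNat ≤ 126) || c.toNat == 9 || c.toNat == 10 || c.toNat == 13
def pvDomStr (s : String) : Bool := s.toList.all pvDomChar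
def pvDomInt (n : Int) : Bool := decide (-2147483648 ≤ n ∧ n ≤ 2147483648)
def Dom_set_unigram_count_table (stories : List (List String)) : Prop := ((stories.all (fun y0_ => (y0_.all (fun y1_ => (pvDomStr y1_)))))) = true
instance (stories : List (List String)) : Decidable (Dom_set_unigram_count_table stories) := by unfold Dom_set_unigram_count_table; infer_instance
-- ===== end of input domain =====

-- B flattens all consecutive word pairs into one list, counts them in a single flat
-- {(w1,w2): c} dict, then reshapes it into the nested table in a second pass
-- (alternative decomposition of the same job; same asymptotic cost).

abbrev PvInner := PySem.Dict String Int
abbrev PvOuter := PySem.Dict String PvInner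

-- ===== PORT A =====
-- each 'elif' condition in A is the exact negation of its preceding 'if', so it ports as 'else'
def pvAStep (ct : PvOuter) (word nxt : String) : PvOuter :=
  if ct.contains word then
    if (ct.getD word PySem.Dict.empty).contains nxt then
      ct.insert word ((ct.getD word PySem.Dict.empty).insert nxt
        ((ct.getD word PySem.Dict.empty).getD nxt 0 + 1))
    else
      ct.insert word ((ct.getD word PySem.Dict.empty).insert nxt 1)
  else
    ct.insert word (PySem.Dict.empty.insert nxt 1)

-- 'for i, word in enumerate(story)' with 'break' at i == len(story)-1: visits each word
-- together with its successor story[i+1], which is the head of the remaining tail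
def pvALoop (ct : PvOuter) (tc : Int) : List String → PvOuter × Int
  | w :: nxt :: rest => pvALoop (pvAStep ct w nxt) (tc + 1) (nxt :: rest)
  | _ => (ct, tc)

def set_unigram_count_table (stories : List (List String)) : Int × (List (String × List (String × Int))) :=
  let st := stories.foldl (fun s story => pvALoop s.1 s.2 story) (PySem.Dict.empty, 0)
  (st.2, st.1.items.map (fun kv => (kv.1, kv.2.items)))

-- ===== PORT B =====
-- table.setdefault(w1, {})[w2] = c
def pvBGroupStep (t : PvOuter) (x : (String × String) × Int) : PvOuter :=
  t.modify x.1.1 PySem.Dict.empty (fun inner => inner.insert x.1.2 x.2)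

def set_unigram_count_table_alt (stories : List (List String)) : Int × (List (String × List (String × Int))) :=
  let pairs := stories.flatMap (fun story => story.zip (PySem.List.slice story (some 1) none))
  let flat := pairs.foldl (fun d p => d.insert p (d.getD p 0 + 1)) PySem.Dict.empty
  let table := flat.items.foldl pvBGroupStep PySem.Dict.empty
  ((pairs.length : Int), table.items.map (fun kv => (kv.1, kv.2.items)))

-- ===== PRECONDITION & SPEC =====
def Spec_set_unigram_count_table (stories : List (List String)) (out : Int × (List (String × List (String × Int)))) : Prop := out = set_unigram_count_table_alt stories
instance (stories : List (List String)) (out : Int × (List (String × List (String × Int)))) : Decidable (Spec_set_unigram_count_table stories out) := by unfold Spec_set_unigram_count_table; infer_instance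

-- ===== CLAIM (what is proved, stated in full; the proofs are below) =====
def Claim_equal_set_unigram_count_table : Prop := ∀ (stories : List (List String)), Dom_set_unigram_count_table stories → Spec_set_unigram_count_table stories (set_unigram_count_table stories)

-- ===== LEMMAS AND PROOFS =====

-- the pair stream both programs process, and the two folds they reduce to
def pvPairs (stories : List (List String)) : List (String × String) :=
  stories.flatMap (fun s => s.zip s.tail)

def pvF (ct : PvOuter) (ps : List (String × String)) : PvOuter :=
  ps.foldl (fun ct p => pvAStep ct p.1 p.2) ct

def pvG (t : PvOuter) (l : List ((String × String) × Int)) : PvOuter :=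
  l.foldl pvBGroupStep t

lemma pvModify_eq_insert {κ ν : Type} [BEq κ] (d : PySem.Dict κ ν) (k : κ) (d0 : ν) (f : ν → ν) :
    d.modify k d0 f = d.insert k (f (d.getD k d0)) := rfl

lemma pvG_append_singleton (t : PvOuter) (l : List ((String × String) × Int))
    (e : (String × String) × Int) :
    pvG t (l ++ [e]) = pvBGroupStep (pvG t l) e := by
  simp [pvG, List.foldl_append]

lemma pvInsert_swap {ν : Type} (d : PySem.Dict String ν) (a a' : String) (v w : ν)
    (ha : d.contains a = true) (hne : a' ≠ a) :
    (d.insert a v).insert a' w = (d.insert a' w).insert a v := by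
  apply PySem.Dict.ext
  by_cases h' : d.contains a' = true
  · rw [PySem.Dict.items_insert_of_contains _ w (by simp [PySem.Dict.contains_insert, h']),
        PySem.Dict.items_insert_of_contains _ v ha,
        PySem.Dict.items_insert_of_contains _ v (by simp [PySem.Dict.contains_insert, ha]),
        PySem.Dict.items_insert_of_contains _ w h']
    simp only [List.map_map]
    refine List.map_congr_left ?_
    intro p _
    by_cases hp : p.1 = a
    · have hp' : p.1 ≠ a' := fun h => hne ((hp ▸ h).symm ▸ rfl)
      simp [Function.comp, hp, Ne.symm hne]
    · by_cases hp' : p.1 = a'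
      · simp [Function.comp, hp', hne]
      · simp [Function.comp, hp, hp']
  · have h'f : d.contains a' = false := by simpa using h'
    have c1 : (d.insert a v).contains a' = false := by
      simp [PySem.Dict.contains_insert, h'f, hne]
    have c2 : (d.insert a' w).contains a = true := by
      simp [PySem.Dict.contains_insert, ha]
    rw [PySem.Dict.items_insert_of_not_contains _ w c1,
        PySem.Dict.items_insert_of_contains _ v ha,
        PySem.Dict.items_insert_of_contains _ v c2,
        PySem.Dict.items_insert_of_not_contains _ w h'f,
        List.map_append]
    simp [hne]

lemma pvModify_swap {ν : Type} (d : PySem.Dict String ν) (a a' : String) (d0 : ν) (f g : ν → ν)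
    (ha : d.contains a = true) (hne : a' ≠ a) :
    (d.modify a d0 f).modify a' d0 g = (d.modify a' d0 g).modify a d0 f := by
  have hga : (d.insert a (f (d.getD a d0))).getD a' d0 = d.getD a' d0 := by
    simp [PySem.Dict.getD_insert, hne]
  have hga' : (d.insert a' (g (d.getD a' d0))).getD a d0 = d.getD a d0 := by
    simp [PySem.Dict.getD_insert, Ne.symm hne]
  simp only [pvModify_eq_insert, hga, hga']
  exact pvInsert_swap d a a' _ _ ha hne

lemma pvALoop_eq (s : List String) : ∀ (ct : PvOuter) (tc : Int),
    pvALoop ct tc s = (pvF ct (s.zip s.tail), tc + ((s.zip s.tail).length : Int)) := by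
  induction s with
  | nil => intro ct tc; simp [pvALoop, pvF]
  | cons w s ih =>
    intro ct tc
    cases s with
    | nil => simp [pvALoop, pvF]
    | cons nxt rest =>
      show pvALoop (pvAStep ct w nxt) (tc + 1) (nxt :: rest) = _
      rw [ih (pvAStep ct w nxt) (tc + 1)]
      simp only [List.tail_cons, List.zip_cons_cons, List.length_cons]
      refine Prod.ext_iff.mpr ⟨rfl, ?_⟩
      push_cast
      ring

lemma pvA_fold_eq (stories : List (List String)) : ∀ (ct : PvOuter) (tc : Int),
    stories.foldl (fun s story => pvALoop s.1 s.2 story) (ct, tc)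
      = (pvF ct (pvPairs stories), tc + ((pvPairs stories).length : Int)) := by
  induction stories with
  | nil => intro ct tc; simp [pvPairs, pvF]
  | cons s rest ih =>
    intro ct tc
    simp only [List.foldl_cons]
    rw [pvALoop_eq s ct tc, ih]
    simp only [pvPairs, List.flatMap_cons, List.length_append, pvF, List.foldl_append]
    refine Prod.ext_iff.mpr ⟨rfl, ?_⟩
    push_cast
    ring

lemma pvG_contains (l : List ((String × String) × Int)) : ∀ (t : PvOuter) (a : String),
    (pvG t l).contains a = (t.contains a || l.any (fun x => x.1.1 == a)) := by
  induction l with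
  | nil => intro t a; simp [pvG]
  | cons x l ih =>
    intro t a
    show (pvG (pvBGroupStep t x) l).contains a = _
    rw [ih]
    unfold pvBGroupStep
    rw [PySem.Dict.contains_modify]
    simp only [List.any_cons]
    by_cases h : a = x.1.1
    · simp [h, Bool.or_comm]
    · have h1 : (a == x.1.1) = false := by simp [h]
      have h2 : (x.1.1 == a) = false := by simp [Ne.symm h]
      simp [h1, h2]

lemma pvG_inner_contains (l : List ((String × String) × Int)) : ∀ (t : PvOuter) (a b : String),
    ((pvG t l).getD a PySem.Dict.empty).contains b
      = ((t.getD a PySem.Dict.empty).contains b || l.any (fun x => x.1.1 == a && x.1.2 == b)) := by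
  induction l with
  | nil => intro t a b; simp [pvG]
  | cons x l ih =>
    intro t a b
    show ((pvG (pvBGroupStep t x) l).getD a PySem.Dict.empty).contains b = _
    rw [ih]
    unfold pvBGroupStep
    rw [PySem.Dict.getD_modify]
    simp only [List.any_cons]
    by_cases h : a = x.1.1
    · rw [if_pos h, PySem.Dict.contains_insert]
      subst h
      by_cases hb : b = x.1.2
      · simp [hb, Bool.or_comm]
      · have h1 : (b == x.1.2) = false := by simp [hb]
        have h2 : (x.1.2 == b) = false := by simp [Ne.symm hb]
        simp [h1, h2]
    · rw [if_neg h]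
      have : (x.1.1 == a) = false := by simp [Ne.symm h]
      simp [this]

lemma pvG_getD_getD (l : List ((String × String) × Int)) : ∀ (t : PvOuter) (a b : String),
    (∀ x ∈ l, x.1 ≠ (a, b)) →
    ((pvG t l).getD a PySem.Dict.empty).getD b 0 = (t.getD a PySem.Dict.empty).getD b 0 := by
  induction l with
  | nil => intro t a b _; rfl
  | cons x l ih =>
    intro t a b h
    show ((pvG (pvBGroupStep t x) l).getD a PySem.Dict.empty).getD b 0 = _
    rw [ih _ a b (fun y hy => h y (List.mem_cons_of_mem _ hy))]
    unfold pvBGroupStep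
    rw [PySem.Dict.getD_modify]
    by_cases ha : a = x.1.1
    · have hb : x.1.2 ≠ b := fun hb =>
        (h x (by simp)) (Prod.ext_iff.mpr ⟨ha.symm, hb⟩)
      rw [if_pos ha, PySem.Dict.getD_insert, if_neg (Ne.symm hb), ha]
    · rw [if_neg ha]

lemma pvG_modify_comm (l : List ((String × String) × Int)) : ∀ (t : PvOuter) (a b : String) (v : Int),
    (∀ x ∈ l, x.1 ≠ (a, b)) → t.contains a = true →
    ((t.getD a PySem.Dict.empty).contains b = true) →
    pvG (t.modify a PySem.Dict.empty (fun inner => inner.insert b v)) l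
      = (pvG t l).modify a PySem.Dict.empty (fun inner => inner.insert b v) := by
  induction l with
  | nil => intro t a b v _ _ _; rfl
  | cons y l ih =>
    intro t a b v hl hta htb
    have hy1 : y.1 ≠ (a, b) := hl y (by simp)
    have hstep : pvBGroupStep (t.modify a PySem.Dict.empty (fun inner => inner.insert b v)) y
        = (pvBGroupStep t y).modify a PySem.Dict.empty (fun inner => inner.insert b v) := by
      by_cases hy : y.1.1 = a
      · have hb : y.1.2 ≠ b := fun hb => hy1 (Prod.ext_iff.mpr ⟨hy, hb⟩)
        unfold pvBGroupStep
        rw [hy]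
        simp only [pvModify_eq_insert, PySem.Dict.getD_insert_self, PySem.Dict.insert_insert_self]
        rw [pvInsert_swap _ b y.1.2 v y.2 htb hb]
      · unfold pvBGroupStep
        exact pvModify_swap t a y.1.1 PySem.Dict.empty _ _ hta hy
    have hc : (pvBGroupStep t y).contains a = true := by
      unfold pvBGroupStep; rw [PySem.Dict.contains_modify]; simp [hta]
    have hcb : ((pvBGroupStep t y).getD a PySem.Dict.empty).contains b = true := by
      unfold pvBGroupStep
      rw [PySem.Dict.getD_modify]
      by_cases h : a = y.1.1
      · rw [if_pos h, PySem.Dict.contains_insert, ← h]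
        simp [htb]
      · rw [if_neg h]; exact htb
    show pvG (pvBGroupStep (t.modify a PySem.Dict.empty (fun inner => inner.insert b v)) y) l = _
    rw [hstep]
    rw [ih (pvBGroupStep t y) a b v (fun x hx => hl x (List.mem_cons_of_mem _ hx)) hc hcb]
    rfl

lemma pvMap_id (l : List ((String × String) × Int)) (a b : String)
    (h : ∀ x ∈ l, x.1 ≠ (a, b)) :
    l.map (fun x => if x.1 = (a, b) then (x.1, x.2 + 1) else x) = l := by
  conv_rhs => rw [← List.map_id l]
  refine List.map_congr_left ?_
  intro x hx
  simp [h x hx]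

lemma pvG_bump (l : List ((String × String) × Int)) : ∀ (t : PvOuter) (a b : String),
    (l.map (fun x => x.1)).Nodup → ((a, b) ∈ l.map (fun x => x.1)) →
    pvG t (l.map (fun x => if x.1 = (a, b) then (x.1, x.2 + 1) else x))
      = (pvG t l).modify a PySem.Dict.empty
          (fun inner => inner.insert b (inner.getD b 0 + 1)) := by
  induction l with
  | nil => intro t a b _ hmem; simp at hmem
  | cons x l ih =>
    intro t a b hnd hmem
    simp only [List.map_cons] at hnd hmem
    rcases List.nodup_cons.mp hnd with ⟨hx_notin, hnd'⟩
    obtain ⟨xk, xv⟩ := x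
    by_cases hx : xk = (a, b)
    · subst hx
      have hfresh : ∀ y ∈ l, y.1 ≠ (a, b) := by
        intro y hy hc
        have hmm : y.1 ∈ l.map (fun x => x.1) := List.mem_map_of_mem hy
        rw [hc] at hmm
        exact hx_notin hmm
      simp only [List.map_cons, if_true]
      rw [pvMap_id l a b hfresh]
      have hcollapse : pvBGroupStep t ((a, b), xv + 1)
          = (pvBGroupStep t ((a, b), xv)).modify a PySem.Dict.empty
              (fun inner => inner.insert b (xv + 1)) := by
        simp only [pvBGroupStep, pvModify_eq_insert, PySem.Dict.getD_insert_self,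
          PySem.Dict.insert_insert_self]
      have hta : (pvBGroupStep t ((a, b), xv)).contains a = true := by
        simp [pvBGroupStep, PySem.Dict.contains_modify]
      have htb : ((pvBGroupStep t ((a, b), xv)).getD a PySem.Dict.empty).contains b = true := by
        simp only [pvBGroupStep]
        rw [PySem.Dict.getD_modify]
        simp [PySem.Dict.contains_insert_self]
      show pvG (pvBGroupStep t ((a, b), xv + 1)) l = _
      rw [hcollapse]
      rw [pvG_modify_comm l (pvBGroupStep t ((a, b), xv)) a b (xv + 1) hfresh hta htb]
      have hrw : pvG t (((a, b), xv) :: l) = pvG (pvBGroupStep t ((a, b), xv)) l := rfl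
      rw [hrw]
      have hval : ((pvG (pvBGroupStep t ((a, b), xv)) l).getD a PySem.Dict.empty).getD b 0 = xv := by
        rw [pvG_getD_getD l _ a b hfresh]
        simp only [pvBGroupStep]
        rw [PySem.Dict.getD_modify]
        simp [PySem.Dict.getD_insert_self]
      simp only [pvModify_eq_insert, hval]
    · have hmem' : (a, b) ∈ l.map (fun x => x.1) := by
        rcases List.mem_cons.mp hmem with h1 | h2
        · exact absurd h1.symm hx
        · exact h2
      simp only [List.map_cons, if_neg hx]
      show pvG (pvBGroupStep t ((xk, xv))) (l.map _) = _
      rw [ih (pvBGroupStep t (xk, xv)) a b hnd' hmem']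
      rfl

lemma pvMain (ps : List (String × String)) :
    pvG PySem.Dict.empty (PySem.Dict.counter ps).items = pvF PySem.Dict.empty ps := by
  induction ps using List.reverseRecOn with
  | nil => rfl
  | append_singleton ps p ih =>
    obtain ⟨a, b⟩ := p
    have hF : pvF PySem.Dict.empty (ps ++ [(a, b)]) = pvAStep (pvF PySem.Dict.empty ps) a b := by
      simp [pvF, List.foldl_append]
    rw [PySem.Dict.counter_append_singleton, pvModify_eq_insert, PySem.Dict.getD_counter,
      hF, ← ih]
    have hndk : ((PySem.Dict.counter ps).items.map (fun x => x.1)).Nodup := by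
      have h := PySem.Dict.nodup_keys_counter (κ := String × String) ps
      simpa [PySem.Dict.keys] using h
    by_cases hp : (a, b) ∈ ps
    · have hcont : (PySem.Dict.counter ps).contains (a, b) = true := by
        rw [PySem.Dict.contains_counter]; simpa using hp
      rw [PySem.Dict.items_insert_of_contains _ _ hcont]
      have hitems : (List.map (fun q => if (q.1 == (a, b)) = true then ((a, b), (ps.count (a, b) : Int) + 1) else q)
            (PySem.Dict.counter ps).items)
          = (PySem.Dict.counter ps).items.map (fun x => if x.1 = (a, b) then (x.1, x.2 + 1) else x) := by
        refine List.map_congr_left ?_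
        intro q hq
        by_cases hqp : q.1 = (a, b)
        · have hqv : q.2 = (ps.count (a, b) : Int) := by
            have hg : (PySem.Dict.counter ps).getD q.1 0 = q.2 := by
              refine PySem.Dict.getD_of_mem_items _ ?_ (PySem.Dict.nodup_keys_counter ps) 0
              obtain ⟨q1, q2⟩ := q
              exact hq
            rw [hqp, PySem.Dict.getD_counter] at hg
            exact hg.symm
          simp [hqp, hqv]
        · simp [hqp]
      rw [hitems]
      have hmemk : ((a, b) : String × String) ∈ (PySem.Dict.counter ps).items.map (fun x => x.1) := by
        have hk : ((a, b) : String × String) ∈ (PySem.Dict.counter ps).keys :=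
          (PySem.Dict.contains_iff_mem_keys _ _).mp hcont
        simpa [PySem.Dict.keys] using hk
      rw [pvG_bump _ PySem.Dict.empty a b hndk hmemk]
      obtain ⟨x, hxmem, hx1⟩ := List.mem_map.mp hmemk
      have hTc : (pvG PySem.Dict.empty (PySem.Dict.counter ps).items).contains a = true := by
        rw [pvG_contains]
        simp only [PySem.Dict.contains_empty, Bool.false_or]
        rw [List.any_eq_true]
        exact ⟨x, hxmem, by simp [hx1]⟩
      have hTcb : ((pvG PySem.Dict.empty (PySem.Dict.counter ps).items).getD a
          PySem.Dict.empty).contains b = true := by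
        rw [pvG_inner_contains]
        simp only [PySem.Dict.getD_empty, PySem.Dict.contains_empty, Bool.false_or]
        rw [List.any_eq_true]
        exact ⟨x, hxmem, by simp [hx1]⟩
      conv_rhs => rw [pvAStep]
      rw [if_pos hTc, if_pos hTcb, pvModify_eq_insert]
    · have hcont : (PySem.Dict.counter ps).contains (a, b) = false := by
        rw [PySem.Dict.contains_counter]; simpa using hp
      have hcount : ps.count (a, b) = 0 := List.count_eq_zero.mpr hp
      rw [PySem.Dict.items_insert_of_not_contains _ _ hcont, hcount]
      rw [pvG_append_singleton]
      have hnob : ((pvG PySem.Dict.empty (PySem.Dict.counter ps).items).getD a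
          PySem.Dict.empty).contains b = false := by
        rw [pvG_inner_contains]
        simp only [PySem.Dict.getD_empty, PySem.Dict.contains_empty, Bool.false_or]
        rw [List.any_eq_false]
        intro x hxmem
        simp only [Bool.and_eq_true, beq_iff_eq, not_and]
        intro h1 h2
        exfalso
        apply hp
        have hk : x.1 ∈ (PySem.Dict.counter ps).keys := by
          simp only [PySem.Dict.keys]
          exact List.mem_map_of_mem hxmem
        have : x.1 = (a, b) := Prod.ext_iff.mpr ⟨h1, h2⟩
        rw [← this]
        have := (PySem.Dict.contains_iff_mem_keys _ x.1).mpr hk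
        rw [PySem.Dict.contains_counter] at this
        simpa using this
      conv_rhs => rw [pvAStep]
      by_cases hTc : (pvG PySem.Dict.empty (PySem.Dict.counter ps).items).contains a = true
      · rw [if_pos hTc, if_neg (by simp [hnob])]
        simp only [pvBGroupStep, pvModify_eq_insert]
        norm_num
      · have hTcf : (pvG PySem.Dict.empty (PySem.Dict.counter ps).items).contains a = false := by
          simpa using hTc
        rw [if_neg (by simp [hTcf])]
        simp only [pvBGroupStep, pvModify_eq_insert]
        have hget : (pvG PySem.Dict.empty (PySem.Dict.counter ps).items).getD a PySem.Dict.empty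
            = PySem.Dict.empty := by
          simp [PySem.Dict.getD_of_not_contains, hTcf]
        rw [hget]
        norm_num

-- ===== VERDICT (by name: the statement is the Claim_ definition above) =====
theorem set_unigram_count_table_spec : Claim_equal_set_unigram_count_table := by
  intro stories _
  unfold Spec_set_unigram_count_table
  unfold set_unigram_count_table set_unigram_count_table_alt
  simp only [PySem.List.slice_from_one]
  rw [pvA_fold_eq stories PySem.Dict.empty 0]
  rw [PySem.Dict.foldl_insert_getD_add_one_eq_counter]
  rw [show (stories.flatMap fun story => story.zip story.tail) = pvPairs stories from rfl]
  have h := pvMain (pvPairs stories)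
  simp only [pvG] at h
  rw [h]
  simp
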